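-- pv_equiv track=rewrite | github.com/510YilinWu/honours-code | SAAT.py | extract_first_second_test_values
-- ===== SOURCE A (Python) =====
-- def extract_first_second_test_values(total_time_results):
--     """
--     Extract the first test and second test values for each participant and each hand.
--
--     Args:
--         total_time_results (dict): Dictionary containing total time results for each participant and hand.
--
--     Returns:
--         dict: Dictionary with first and second test values for each participant and hand.
--     """
--     first_second_test_values = {}
--
--     for participant, hands in total_time_results.items():
--         first_second_test_values[participant] = {}
--         for hand, trials in hands.items():
--             sorted_trials = sorted(trials.items())  # Ensure trials are sorted by trial number
--             if len(sorted_trials) >= 2:  # Ensure there are at least two trials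
--                 first_test = sorted_trials[0][1]
--                 second_test = sorted_trials[1][1]
--                 first_second_test_values[participant][hand] = {
--                     'first_test': first_test,
--                     'second_test': second_test
--                 }
--
--     return first_second_test_values
-- ===== SOURCE B (Python) =====
-- def extract_first_second_test_values(total_time_results):
--     result = {}
--     for participant, hands in total_time_results.items():
--         per_hand = {}
--         for hand, trials in hands.items():
--             if len(trials) < 2:
--                 continue
--             it = iter(trials.items())
--             best1 = next(it)
--             best2 = next(it)
--             if best2 < best1:
--                 best1, best2 = best2, best1
--             for p in it:
--                 if p < best1:
--                     best1, best2 = p, best1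
--                 elif p < best2:
--                     best2 = p
--             per_hand[hand] = {'first_test': best1[1], 'second_test': best2[1]}
--         result[participant] = per_hand
--     return result
-- ===== Notes on version B (the rewrite author's own statement) =====
-- stated objective: alternative
-- what changed: Per hand, the sort of all trial items followed by taking the first two is replaced by a single linear scan that tracks the two lexicographically smallest (trial, value) pairs with explicit comparisons.
import Mathlib
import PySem

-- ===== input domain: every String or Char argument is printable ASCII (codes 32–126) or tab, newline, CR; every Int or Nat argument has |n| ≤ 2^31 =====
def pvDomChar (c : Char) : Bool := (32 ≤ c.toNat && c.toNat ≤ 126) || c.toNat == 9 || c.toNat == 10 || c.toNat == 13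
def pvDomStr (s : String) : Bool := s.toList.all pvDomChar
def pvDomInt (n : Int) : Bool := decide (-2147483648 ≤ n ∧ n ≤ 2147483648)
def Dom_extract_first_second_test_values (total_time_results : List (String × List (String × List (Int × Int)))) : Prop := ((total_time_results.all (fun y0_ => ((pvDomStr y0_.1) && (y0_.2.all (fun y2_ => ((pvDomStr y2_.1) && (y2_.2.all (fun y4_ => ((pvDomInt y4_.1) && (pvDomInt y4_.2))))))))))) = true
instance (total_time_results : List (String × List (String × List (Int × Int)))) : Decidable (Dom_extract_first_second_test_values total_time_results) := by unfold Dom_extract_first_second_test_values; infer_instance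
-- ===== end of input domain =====

-- B replaces A's per-hand `sorted(trials.items())[0:2]` (sort, then take two) by a single
-- linear two-minima scan over the items; objective: alternative (single pass, no sort).

-- ===== PORT A =====
-- inner per-hand loop body of A: sort the trials, keep the first two values if there are at least two
def pvHandA (hacc : List (String × List (String × Int))) (hp : String × List (Int × Int)) :
    List (String × List (String × Int)) :=
  let sorted_trials := PySem.List.sorted2 hp.2 (fun t => t.1) (fun t => t.2) false
  if 2 ≤ sorted_trials.length then
    match sorted_trials with
    | a :: b :: _ => hacc ++ [(hp.1, [("first_test", a.2), ("second_test", b.2)])]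
    | _ => hacc            -- unreachable under the length guard
  else hacc

def extract_first_second_test_values (total_time_results : List (String × List (String × List (Int × Int)))) : List (String × List (String × List (String × Int))) :=
  total_time_results.foldl (fun acc pr => acc ++ [(pr.1, pr.2.foldl pvHandA [])]) []

-- ===== PORT B =====
-- Python tuple '<' on (Int × Int): lexicographic
def pvLt (a b : Int × Int) : Bool := a.1 < b.1 || (a.1 == b.1 && a.2 < b.2)

-- one step of the two-minima scan
def pvStep (bp : (Int × Int) × (Int × Int)) (p : Int × Int) : (Int × Int) × (Int × Int) :=
  if pvLt p bp.1 then (p, bp.1) else if pvLt p bp.2 then (bp.1, p) else bp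

-- inner per-hand loop body of B: seed the two minima from the first two items, then scan the rest
def pvHandB (hacc : List (String × List (String × Int))) (hp : String × List (Int × Int)) :
    List (String × List (String × Int)) :=
  match hp.2 with
  | t0 :: t1 :: rest =>
      let init := if pvLt t1 t0 then (t1, t0) else (t0, t1)
      let bb := rest.foldl pvStep init
      hacc ++ [(hp.1, [("first_test", bb.1.2), ("second_test", bb.2.2)])]
  | _ => hacc

def extract_first_second_test_values_alt (total_time_results : List (String × List (String × List (Int × Int)))) : List (String × List (String × List (String × Int))) :=
  total_time_results.foldl (fun acc pr => acc ++ [(pr.1, pr.2.foldl pvHandB [])]) []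

-- ===== PRECONDITION & SPEC =====
def Spec_extract_first_second_test_values (total_time_results : List (String × List (String × List (Int × Int)))) (out : List (String × List (String × List (String × Int)))) : Prop := out = extract_first_second_test_values_alt total_time_results
instance (total_time_results : List (String × List (String × List (Int × Int)))) (out : List (String × List (String × List (String × Int)))) : Decidable (Spec_extract_first_second_test_values total_time_results out) := by unfold Spec_extract_first_second_test_values; infer_instance

-- ===== CLAIM (what is proved, stated in full; the proofs are below) =====
def Claim_equal_extract_first_second_test_values : Prop := ∀ (total_time_results : List (String × List (String × List (Int × Int)))), Dom_extract_first_second_test_values total_time_results → Spec_extract_first_second_test_values total_time_results (extract_first_second_test_values total_time_results)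

-- ===== LEMMAS AND PROOFS =====

-- the comparison sorted2 uses internally, named for the proofs
def pvBefA (a b : Int × Int) : Bool :=
  decide (a.1 < b.1) || (!decide (b.1 < a.1) && decide (a.2 < b.2))

theorem pvLt_eq_befA (a b : Int × Int) : pvLt a b = pvBefA a b := by
  simp only [pvLt, pvBefA]
  by_cases h1 : a.1 < b.1 <;> by_cases h2 : b.1 < a.1 <;> by_cases h3 : a.2 < b.2 <;>
    simp [h1, h2, h3] <;> omega

theorem pvSorted2_eq_foldl (xs : List (Int × Int)) :
    PySem.List.sorted2 xs (fun t => t.1) (fun t => t.2) false =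
      xs.foldl (fun acc x => PySem.List.insertBy pvBefA x acc) [] := rfl

-- the first two entries of a (long-enough) list
def pvFirst2 (l : List (Int × Int)) : (Int × Int) × (Int × Int) :=
  match l with
  | a :: b :: _ => (a, b)
  | _ => ((0, 0), (0, 0))

theorem pvInsert_first2 (x a b : Int × Int) (t : List (Int × Int)) :
    ∃ t', PySem.List.insertBy pvBefA x (a :: b :: t) =
      (pvStep (a, b) x).1 :: (pvStep (a, b) x).2 :: t' := by
  simp only [PySem.List.insertBy, pvStep, pvLt_eq_befA]
  by_cases h1 : pvBefA x a = true <;> by_cases h2 : pvBefA x b = true <;> simp [h1, h2]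

theorem pvFoldl_first2 (rest : List (Int × Int)) :
    ∀ (a b : Int × Int) (t : List (Int × Int)),
      pvFirst2 (rest.foldl (fun acc x => PySem.List.insertBy pvBefA x acc) (a :: b :: t)) =
        rest.foldl pvStep (a, b) := by
  induction rest with
  | nil => intro a b t; rfl
  | cons x rest ih =>
      intro a b t
      obtain ⟨t', ht'⟩ := pvInsert_first2 x a b t
      simp only [List.foldl_cons, ht', ih]

theorem pvHand_eq (hacc : List (String × List (String × Int))) (hp : String × List (Int × Int)) :
    pvHandA hacc hp = pvHandB hacc hp := by
  obtain ⟨h, trials⟩ := hp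
  match trials with
  | [] => rfl
  | [t0] => rfl
  | t0 :: t1 :: rest =>
      simp only [pvHandA, pvHandB, pvSorted2_eq_foldl]
      have hstart : (t0 :: t1 :: rest).foldl (fun acc x => PySem.List.insertBy pvBefA x acc) [] =
          rest.foldl (fun acc x => PySem.List.insertBy pvBefA x acc)
            ((if pvLt t1 t0 then (t1, t0) else (t0, t1)).1 ::
             (if pvLt t1 t0 then (t1, t0) else (t0, t1)).2 :: []) := by
        simp only [List.foldl_cons, PySem.List.insertBy, pvLt_eq_befA]
        by_cases h1 : pvBefA t1 t0 = true <;> simp [h1]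
      have hlen : 2 ≤ ((t0 :: t1 :: rest).foldl (fun acc x => PySem.List.insertBy pvBefA x acc) []).length := by
        have hperm := PySem.List.sorted2_perm (t0 :: t1 :: rest) (fun t => t.1) (fun t => t.2) false
        rw [pvSorted2_eq_foldl] at hperm
        rw [hperm.length_eq]
        simp
      have hf2 : pvFirst2 ((t0 :: t1 :: rest).foldl (fun acc x => PySem.List.insertBy pvBefA x acc) []) =
          rest.foldl pvStep (if pvLt t1 t0 then (t1, t0) else (t0, t1)) := by
        rw [hstart]
        rcases hi : (if pvLt t1 t0 then (t1, t0) else (t0, t1)) with ⟨c, d⟩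
        exact pvFoldl_first2 rest c d []
      generalize hsm : (t0 :: t1 :: rest).foldl (fun acc x => PySem.List.insertBy pvBefA x acc) [] = s at hlen hf2 ⊢
      match s with
      | a :: b :: t =>
          simp only [pvFirst2] at hf2
          simp only [if_pos hlen]
          rw [← hf2]
      | [] => simp at hlen
      | [a] => simp at hlen

-- ===== VERDICT (by name: the statement is the Claim_ definition above) =====
theorem extract_first_second_test_values_spec : Claim_equal_extract_first_second_test_values := by
  intro ttr _
  unfold Spec_extract_first_second_test_values extract_first_second_test_values
    extract_first_second_test_values_alt
  have h : pvHandA = pvHandB := funext fun hacc => funext fun hp => pvHand_eq hacc hp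
  rw [h]
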